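-- pv_equiv track=rewrite | github.com/zhouhq10/program-induction-rdt | src/utils/complexity_measurement.py | count_subsymmetries
-- ===== SOURCE A (Python) =====
-- def count_subsymmetries(sequence):
--     """
--     Count the number of symmetric (palindromic) subsequences in a sequence.
--
--     Parameters:
--     sequence (list): A list of integers or characters.
--
--     Returns:
--     int: The number of symmetric subsequences in the sequence.
--     """
--     n = len(sequence)
--
--     # Create a DP table to store counts of palindromic subsequences
--     dp = [[0] * n for _ in range(n)]
--
--     # Every single character is a palindromic subsequence
--     for i in range(n):
--         dp[i][i] = 1
--
--     # Check for subsequences of length greater than 1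
--     for length in range(2, n + 1):  # Length of subsequence
--         for i in range(n - length + 1):
--             j = i + length - 1  # Ending index of the subsequence
--
--             if sequence[i] == sequence[j]:
--                 dp[i][j] = dp[i + 1][j] + dp[i][j - 1] + 1
--             else:
--                 dp[i][j] = dp[i + 1][j] + dp[i][j - 1] - dp[i + 1][j - 1]
--
--     # Sum up the counts of all symmetric subsequences
--     total_symmetric_subsequences = sum(dp[i][j] for i in range(n) for j in range(i, n))
--
--     return total_symmetric_subsequences
-- ===== SOURCE B (Python) =====
-- def count_subsymmetries(sequence):
--     """Count palindromic subsequences summed over all subintervals.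
--
--     Different counting decomposition: instead of computing, for every
--     interval [i..j], the number of palindromic subsequences it contains
--     (A's n x n interval table), count every palindromic subsequence ONCE
--     by its pair of endpoint positions (first occurrence a, last b) and
--     multiply by the closed-form number (a+1)*(n-b) of intervals [i..j]
--     with i <= a and b <= j that contain it.  col[a] = number of
--     palindromic subsequences whose first element is at a and last at the
--     current column j (1 + count of palindromic subsequences strictly
--     inside, read off W, when sequence[a] == sequence[j]); W[i] maintains
--     the number of palindromic subsequences lying within [i .. j-1] and
--     is updated by a running suffix sum of the column - no
--     inclusion-exclusion subtraction is ever needed.  O(n) memory.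
--     """
--     n = len(sequence)
--     W = [0] * n
--     total = 0
--     for j in range(n):
--         col = [0] * (j + 1)
--         col[j] = 1
--         for a in range(j):
--             if sequence[a] == sequence[j]:
--                 col[a] = W[a + 1] + 1
--         suf = 0
--         for a in range(j, -1, -1):
--             c = col[a]
--             suf += c
--             total += (a + 1) * (n - j) * c
--             W[a] += suf
--     return total
-- ===== Notes on version B (the rewrite author's own statement) =====
-- stated objective: alternative
-- what changed: Counts each palindromic subsequence once by its endpoint pair (col[a] per right endpoint j, built without any inclusion-exclusion subtraction, plus a suffix-summed running count W[i] of subsequences inside [i..j-1]) and multiplies it by the closed-form number (a+1)*(n-j) of intervals containing it, instead of A's n x n table of per-interval counts summed over all intervals; memory drops from O(n^2) to O(n).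
import Mathlib
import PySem

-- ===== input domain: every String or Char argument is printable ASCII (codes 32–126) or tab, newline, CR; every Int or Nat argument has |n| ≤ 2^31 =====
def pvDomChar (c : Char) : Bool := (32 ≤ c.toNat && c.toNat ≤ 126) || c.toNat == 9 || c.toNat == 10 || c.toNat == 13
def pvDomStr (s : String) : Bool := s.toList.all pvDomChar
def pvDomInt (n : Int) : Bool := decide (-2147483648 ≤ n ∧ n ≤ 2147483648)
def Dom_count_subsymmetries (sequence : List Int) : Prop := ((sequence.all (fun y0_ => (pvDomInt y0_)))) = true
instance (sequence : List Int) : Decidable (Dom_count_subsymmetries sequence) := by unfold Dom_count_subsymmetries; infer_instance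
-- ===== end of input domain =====

-- B counts each palindromic subsequence once by its endpoint pair and weights it by
-- the closed-form number (a+1)*(n-j) of intervals containing it, instead of A's
-- n×n table of per-interval counts summed over all intervals (same O(n^2) time, O(n) memory).

-- ===== PORT A =====
-- dp[i][j] read/write on an n×n table of lists (indices always in range in A)
def pvGet2 (d : List (List Int)) (i j : Nat) : Int := (d.getD i []).getD j 0
def pvSet2 (d : List (List Int)) (i j : Nat) (v : Int) : List (List Int) :=
  d.set i ((d.getD i []).set j v)

def count_subsymmetries (sequence : List Int) : Int :=
  let n := sequence.length
  let dp0 : List (List Int) := List.replicate n (List.replicate n (0 : Int))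
  let dp1 := (List.range n).foldl (fun d i => pvSet2 d i i 1) dp0
  let dp2 := (List.range' 2 (n - 1)).foldl (fun d length =>
    (List.range (n - length + 1)).foldl (fun d i =>
      let j := i + length - 1
      if sequence.getD i 0 = sequence.getD j 0 then
        pvSet2 d i j (pvGet2 d (i+1) j + pvGet2 d i (j-1) + 1)
      else
        pvSet2 d i j (pvGet2 d (i+1) j + pvGet2 d i (j-1) - pvGet2 d (i+1) (j-1))) d) dp1
  (List.range n).foldl (fun acc i =>
    (List.range' i (n - i)).foldl (fun acc j => acc + pvGet2 dp2 i j) acc) 0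

-- ===== PORT B =====
def count_subsymmetries_alt (sequence : List Int) : Int :=
  let n := sequence.length
  let res := (List.range n).foldl (fun (st : List Int × Int) j =>
    let W := st.1
    -- col[a] = number of palindromic subsequences with first element at a, last at j
    let col := (List.range j).foldl (fun c a =>
        if sequence.getD a 0 = sequence.getD j 0 then c.set a (W.getD (a+1) 0 + 1) else c)
      ((List.replicate (j+1) (0 : Int)).set j 1)
    -- downward pass: weight each endpoint pair by (a+1)*(n-j) intervals containing it,
    -- and fold the column's suffix sums into W
    let inner := ((List.range (j+1)).reverse).foldl
      (fun (st2 : (List Int × Int) × Int) a =>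
        let c := col.getD a 0
        let suf := st2.2 + c
        ((st2.1.1.set a (st2.1.1.getD a 0 + suf),
          st2.1.2 + ((a : Int) + 1) * ((n : Int) - (j : Int)) * c), suf))
      ((W, st.2), 0)
    inner.1) (List.replicate n 0, 0)
  res.2

-- ===== PRECONDITION & SPEC =====
def Spec_count_subsymmetries (sequence : List Int) (out : Int) : Prop := out = count_subsymmetries_alt sequence
instance (sequence : List Int) (out : Int) : Decidable (Spec_count_subsymmetries sequence out) := by unfold Spec_count_subsymmetries; infer_instance

-- ===== CLAIM (what is proved, stated in full; the proofs are below) =====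
def Claim_equal_count_subsymmetries : Prop := ∀ (sequence : List Int), Dom_count_subsymmetries sequence → Spec_count_subsymmetries sequence (count_subsymmetries sequence)

-- ===== LEMMAS AND PROOFS =====

-- the common mathematical value: number of palindromic subsequences of s[i..j]
def pal (s : List Int) (i j : Nat) : Int :=
  if j ≤ i then (if i = j then 1 else 0)
  else if s.getD i 0 = s.getD j 0 then pal s (i+1) j + pal s i (j-1) + 1
  else pal s (i+1) j + pal s i (j-1) - pal s (i+1) (j-1)
termination_by j - i
decreasing_by all_goals omega

lemma pal_lt (s : List Int) {i j : Nat} (h : j < i) : pal s i j = 0 := by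
  rw [pal]; simp [Nat.le_of_lt h, Nat.ne_of_gt h]

lemma pal_self (s : List Int) (i : Nat) : pal s i i = 1 := by
  rw [pal]; simp

lemma pal_rec (s : List Int) {i j : Nat} (h : i < j) :
    pal s i j = if s.getD i 0 = s.getD j 0 then pal s (i+1) j + pal s i (j-1) + 1
                else pal s (i+1) j + pal s i (j-1) - pal s (i+1) (j-1) := by
  rw [pal]; simp [Nat.not_le.mpr h]

lemma getD_set {α : Type} (l : List α) (i k : Nat) (v d : α) (hi : i < l.length) :
    (l.set i v).getD k d = if k = i then v else l.getD k d := by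
  by_cases h : k = i
  · subst h; simp [List.getD_eq_getElem?_getD, hi]
  · simp [List.getD_eq_getElem?_getD, List.getElem?_set, Ne.symm h, h]

lemma getD_replicate {α : Type} (n k : Nat) (x d : α) :
    (List.replicate n x).getD k d = if k < n then x else d := by
  simp [List.getD_eq_getElem?_getD, List.getElem?_replicate]
  split <;> rfl

lemma foldl_add_map (f : Nat → Int) (l : List Nat) (a : Int) :
    l.foldl (fun acc x => acc + f x) a = a + (l.map f).sum := by
  induction l generalizing a with
  | nil => simp
  | cons x t ih => simp [List.foldl_cons, ih, add_assoc]

def rowSum (s : List Int) (n i : Nat) : Int := ((List.range' i (n - i)).map (pal s i)).sum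
def grand (s : List Int) (n : Nat) : Int := ((List.range n).map (rowSum s n)).sum

-- ---- A side ----

def Shape (d : List (List Int)) (n : Nat) : Prop :=
  d.length = n ∧ ∀ a, a < n → (d.getD a []).length = n

lemma shape_set2 {d : List (List Int)} {n : Nat} (h : Shape d n) {i : Nat} (hi : i < n)
    (j : Nat) (v : Int) : Shape (pvSet2 d i j v) n := by
  obtain ⟨hlen, hrow⟩ := h
  refine ⟨by simp [pvSet2, hlen], ?_⟩
  intro a ha
  unfold pvSet2
  rw [getD_set _ _ _ _ _ (by omega)]
  by_cases hai : a = i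
  · rw [if_pos hai, List.length_set]; exact hrow i hi
  · rw [if_neg hai]; exact hrow a ha

lemma get2_set2 {d : List (List Int)} {n : Nat} (h : Shape d n) {i j a b : Nat}
    (hi : i < n) (hj : j < n) (ha : a < n) (hb : b < n) (v : Int) :
    pvGet2 (pvSet2 d i j v) a b = if a = i ∧ b = j then v else pvGet2 d a b := by
  obtain ⟨hlen, hrow⟩ := h
  have hdl : i < d.length := by omega
  have hrl : j < (d.getD i []).length := by rw [hrow i hi]; exact hj
  unfold pvGet2 pvSet2
  rw [getD_set _ _ _ _ _ hdl]
  by_cases hai : a = i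
  · rw [if_pos hai, getD_set _ _ _ _ _ hrl]
    by_cases hbj : b = j
    · rw [if_pos hbj, if_pos ⟨hai, hbj⟩]
    · rw [if_neg hbj, if_neg (by tauto), hai]
  · rw [if_neg hai, if_neg (by tauto)]

lemma A_diag_aux (s : List Int) (n : Nat) : ∀ k, k ≤ n →
    (Shape ((List.range k).foldl (fun d i => pvSet2 d i i 1)
        (List.replicate n (List.replicate n (0 : Int)))) n ∧
     ∀ a b, a < n → b < n →
       pvGet2 ((List.range k).foldl (fun d i => pvSet2 d i i 1)
          (List.replicate n (List.replicate n (0 : Int)))) a b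
         = if a = b ∧ a < k then 1 else 0) := by
  intro k
  induction k with
  | zero =>
      intro _
      simp only [List.range_zero, List.foldl_nil]
      refine ⟨⟨by simp, ?_⟩, ?_⟩
      · intro a ha; rw [getD_replicate, if_pos ha]; simp
      · intro a b ha hb
        simp [pvGet2, getD_replicate, ha, hb]
  | succ k ih =>
      intro hk
      obtain ⟨hsh, hget⟩ := ih (by omega)
      rw [List.range_succ, List.foldl_append, List.foldl_cons, List.foldl_nil]
      have hk' : k < n := by omega
      refine ⟨shape_set2 hsh hk' k 1, ?_⟩
      intro a b ha hb
      rw [get2_set2 hsh hk' hk' ha hb, hget a b ha hb]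
      by_cases hab : a = k ∧ b = k
      · rw [if_pos hab, if_pos (by omega)]
      · rw [if_neg hab]
        exact if_congr (by omega) rfl rfl

lemma A_diag (s : List Int) :
    Shape ((List.range s.length).foldl (fun d i => pvSet2 d i i 1)
      (List.replicate s.length (List.replicate s.length (0 : Int)))) s.length ∧
    ∀ a b, a < s.length → b < s.length →
      pvGet2 ((List.range s.length).foldl (fun d i => pvSet2 d i i 1)
        (List.replicate s.length (List.replicate s.length (0 : Int)))) a b
        = if b < a + 1 then pal s a b else 0 := by
  obtain ⟨hsh, hget⟩ := A_diag_aux s s.length s.length (le_refl _)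
  refine ⟨hsh, ?_⟩
  intro a b ha hb
  rw [hget a b ha hb]
  by_cases hab : a = b
  · subst hab; rw [if_pos ⟨rfl, ha⟩, if_pos (by omega), pal_self]
  · by_cases hba : b < a
    · rw [if_neg (by omega), if_pos (by omega), pal_lt s hba]
    · rw [if_neg (by omega), if_neg (by omega)]

-- one pass of A's inner loop (one cell of span L written)
lemma A_step (s : List Int) {n : Nat} (L : Nat) (hL : 2 ≤ L) (hLn : L ≤ n)
    (k : Nat) (hk : k + 1 ≤ n - L + 1) (d : List (List Int)) (hsh : Shape d n)
    (hget : ∀ a b, a < n → b < n →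
      pvGet2 d a b = if b < a + (L - 1) ∨ (b + 1 = a + L ∧ a < k) then pal s a b else 0) :
    Shape ((fun d i =>
        let j := i + L - 1
        if s.getD i 0 = s.getD j 0 then
          pvSet2 d i j (pvGet2 d (i+1) j + pvGet2 d i (j-1) + 1)
        else
          pvSet2 d i j (pvGet2 d (i+1) j + pvGet2 d i (j-1) - pvGet2 d (i+1) (j-1))) d k) n ∧
    ∀ a b, a < n → b < n →
      pvGet2 ((fun d i =>
        let j := i + L - 1
        if s.getD i 0 = s.getD j 0 then
          pvSet2 d i j (pvGet2 d (i+1) j + pvGet2 d i (j-1) + 1)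
        else
          pvSet2 d i j (pvGet2 d (i+1) j + pvGet2 d i (j-1) - pvGet2 d (i+1) (j-1))) d k) a b
        = if b < a + (L - 1) ∨ (b + 1 = a + L ∧ a < k + 1) then pal s a b else 0 := by
  have hkn : k < n := by omega
  have hjn : k + L - 1 < n := by omega
  have hk1n : k + 1 < n := by omega
  have hj1n : k + L - 1 - 1 < n := by omega
  have r1 : pvGet2 d (k+1) (k + L - 1) = pal s (k+1) (k + L - 1) := by
    rw [hget _ _ hk1n hjn, if_pos (Or.inl (by omega))]
  have r2 : pvGet2 d k (k + L - 1 - 1) = pal s k (k + L - 1 - 1) := by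
    rw [hget _ _ hkn hj1n, if_pos (Or.inl (by omega))]
  have r3 : pvGet2 d (k+1) (k + L - 1 - 1) = pal s (k+1) (k + L - 1 - 1) := by
    rw [hget _ _ hk1n hj1n, if_pos (Or.inl (by omega))]
  have hpal : pal s k (k + L - 1)
      = if s.getD k 0 = s.getD (k + L - 1) 0 then
          pal s (k+1) (k + L - 1) + pal s k (k + L - 1 - 1) + 1
        else pal s (k+1) (k + L - 1) + pal s k (k + L - 1 - 1) - pal s (k+1) (k + L - 1 - 1) :=
    pal_rec s (by omega)
  simp only []
  split_ifs with hs
  · refine ⟨shape_set2 hsh hkn _ _, ?_⟩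
    intro a b ha hb
    rw [get2_set2 hsh hkn hjn ha hb]
    by_cases hab : a = k ∧ b = k + L - 1
    · rw [if_pos hab, if_pos (Or.inr (by omega)), hab.1, hab.2, r1, r2, hpal, if_pos hs]
    · rw [if_neg hab, hget a b ha hb]
      exact if_congr (by omega) rfl rfl
  · refine ⟨shape_set2 hsh hkn _ _, ?_⟩
    intro a b ha hb
    rw [get2_set2 hsh hkn hjn ha hb]
    by_cases hab : a = k ∧ b = k + L - 1
    · rw [if_pos hab, if_pos (Or.inr (by omega)), hab.1, hab.2, r1, r2, r3, hpal, if_neg hs]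
    · rw [if_neg hab, hget a b ha hb]
      exact if_congr (by omega) rfl rfl

lemma A_inner (s : List Int) {n : Nat} (L : Nat) (hL : 2 ≤ L) (hLn : L ≤ n)
    (d : List (List Int)) (hsh : Shape d n)
    (hget : ∀ a b, a < n → b < n → pvGet2 d a b = if b < a + (L - 1) then pal s a b else 0) :
    ∀ k, k ≤ n - L + 1 →
    Shape ((List.range k).foldl (fun d i =>
        let j := i + L - 1
        if s.getD i 0 = s.getD j 0 then
          pvSet2 d i j (pvGet2 d (i+1) j + pvGet2 d i (j-1) + 1)
        else
          pvSet2 d i j (pvGet2 d (i+1) j + pvGet2 d i (j-1) - pvGet2 d (i+1) (j-1))) d) n ∧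
    ∀ a b, a < n → b < n →
      pvGet2 ((List.range k).foldl (fun d i =>
        let j := i + L - 1
        if s.getD i 0 = s.getD j 0 then
          pvSet2 d i j (pvGet2 d (i+1) j + pvGet2 d i (j-1) + 1)
        else
          pvSet2 d i j (pvGet2 d (i+1) j + pvGet2 d i (j-1) - pvGet2 d (i+1) (j-1))) d) a b
        = if b < a + (L - 1) ∨ (b + 1 = a + L ∧ a < k) then pal s a b else 0 := by
  intro k
  induction k with
  | zero =>
      intro _
      simp only [List.range_zero, List.foldl_nil]
      refine ⟨hsh, ?_⟩
      intro a b ha hb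
      rw [hget a b ha hb]
      exact if_congr (by omega) rfl rfl
  | succ k ih =>
      intro hk
      obtain ⟨hsh', hget'⟩ := ih (by omega)
      rw [List.range_succ, List.foldl_append, List.foldl_cons, List.foldl_nil]
      exact A_step s L hL hLn k hk _ hsh' hget'

lemma A_outer (s : List Int) {n : Nat} :
    ∀ (c L : Nat) (d : List (List Int)), 1 ≤ L → L + c ≤ n ∨ c = 0 →
    Shape d n →
    (∀ a b, a < n → b < n → pvGet2 d a b = if b < a + L then pal s a b else 0) →
    Shape ((List.range' (L+1) c).foldl (fun d length =>
      (List.range (n - length + 1)).foldl (fun d i =>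
        let j := i + length - 1
        if s.getD i 0 = s.getD j 0 then
          pvSet2 d i j (pvGet2 d (i+1) j + pvGet2 d i (j-1) + 1)
        else
          pvSet2 d i j (pvGet2 d (i+1) j + pvGet2 d i (j-1) - pvGet2 d (i+1) (j-1))) d) d) n ∧
    ∀ a b, a < n → b < n →
      pvGet2 ((List.range' (L+1) c).foldl (fun d length =>
        (List.range (n - length + 1)).foldl (fun d i =>
          let j := i + length - 1
          if s.getD i 0 = s.getD j 0 then
            pvSet2 d i j (pvGet2 d (i+1) j + pvGet2 d i (j-1) + 1)
          else
            pvSet2 d i j (pvGet2 d (i+1) j + pvGet2 d i (j-1) - pvGet2 d (i+1) (j-1))) d) d) a b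
        = if b < a + (L + c) then pal s a b else 0 := by
  intro c
  induction c with
  | zero =>
      intro L d hL _ hsh hget
      simpa using ⟨hsh, hget⟩
  | succ c ih =>
      intro L d hL hcn hsh hget
      have hLn : L + 1 ≤ n := by omega
      rw [List.range'_succ, List.foldl_cons]
      have hpre : ∀ a b, a < n → b < n →
          pvGet2 d a b = if b < a + (L + 1 - 1) then pal s a b else 0 := by
        intro a b ha hb
        rw [hget a b ha hb]
        exact if_congr (by omega) rfl rfl
      obtain ⟨hsh1, hget1⟩ := A_inner s (L+1) (by omega) hLn d hsh hpre (n - (L+1) + 1) (le_refl _)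
      have hfin := ih (L+1) _ (by omega) (by omega) hsh1
        (fun a b ha hb => (hget1 a b ha hb).trans (if_congr (by omega) rfl rfl))
      have harith : L + 1 + c = L + (c + 1) := by omega
      rw [harith] at hfin
      have harith2 : L + 1 + 1 = L + 2 := by omega
      rw [harith2] at hfin
      exact hfin

lemma sum_fold_eq_grand (s : List Int) {n : Nat} (d : List (List Int))
    (hget : ∀ i j, i < n → j < n → i ≤ j → pvGet2 d i j = pal s i j) :
    (List.range n).foldl (fun acc i =>
      (List.range' i (n - i)).foldl (fun acc j => acc + pvGet2 d i j) acc) 0 = grand s n := by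
  have hfun : (fun (acc : Int) (i : Nat) =>
      (List.range' i (n - i)).foldl (fun acc j => acc + pvGet2 d i j) acc)
      = fun acc i => acc + ((List.range' i (n - i)).map (fun j => pvGet2 d i j)).sum := by
    funext acc i; exact foldl_add_map _ _ _
  rw [hfun, foldl_add_map, zero_add]
  unfold grand rowSum
  apply congrArg List.sum
  apply List.map_congr_left
  intro i hi
  apply congrArg List.sum
  apply List.map_congr_left
  intro j hj
  have hi' : i < n := List.mem_range.mp hi
  have hj' : i ≤ j ∧ j < i + (n - i) := List.mem_range'_1.mp hj
  exact hget i j hi' (by omega) (by omega)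

lemma A_eq_grand (s : List Int) : count_subsymmetries s = grand s s.length := by
  obtain ⟨hsh1, hget1⟩ := A_diag s
  have h2 := A_outer s (s.length - 1) 1 _ (le_refl 1) (by omega) hsh1 hget1
  obtain ⟨-, hget2⟩ := h2
  simp only [count_subsymmetries]
  apply sum_fold_eq_grand s
  intro i j hi hj hij
  rw [hget2 i j hi hj, if_pos (by omega)]

-- ---- B side ----

-- number of palindromic subsequences of s whose first element sits at x and last at y
def palP (s : List Int) (x y : Nat) : Int :=
  if x = y then 1
  else if x < y then (if s.getD x 0 = s.getD y 0 then pal s (x+1) (y-1) + 1 else 0)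
  else 0

-- number of palindromic subsequences lying within [i, j)
def Tlt (s : List Int) (i j : Nat) : Int :=
  ∑ y ∈ Finset.Ico i j, ∑ x ∈ Finset.Ico i (y+1), palP s x y

lemma Ico_sum_bot (a b : Nat) (h : a < b) (f : Nat → Int) :
    ∑ x ∈ Finset.Ico a b, f x = f a + ∑ x ∈ Finset.Ico (a+1) b, f x := by
  have : Finset.Ico a b = insert a (Finset.Ico (a+1) b) := by
    ext k; simp only [Finset.mem_Ico, Finset.mem_insert]; omega
  rw [this, Finset.sum_insert (by simp [Finset.mem_Ico])]

lemma Ico_empty_sum (a b : Nat) (h : b ≤ a) (f : Nat → Int) :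
    ∑ x ∈ Finset.Ico a b, f x = 0 := by
  have : Finset.Ico a b = ∅ := by rw [Finset.Ico_eq_empty_iff]; omega
  rw [this, Finset.sum_empty]

lemma Tlt_col (s : List Int) (i j : Nat) :
    Tlt s i (j+1) = Tlt s i j + ∑ x ∈ Finset.Ico i (j+1), palP s x j := by
  unfold Tlt
  by_cases h : i ≤ j
  · rw [Finset.sum_Ico_succ_top h]
  · rw [Ico_empty_sum _ _ (by omega), Ico_empty_sum _ _ (by omega),
      Ico_empty_sum _ _ (by omega)]
    ring

lemma pal_eq_Tlt (s : List Int) : ∀ k i j, j + 1 - i ≤ k → pal s i j = Tlt s i (j+1) := by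
  intro k
  induction k with
  | zero =>
      intro i j hk
      rw [pal_lt s (by omega)]
      unfold Tlt
      rw [Ico_empty_sum _ _ (by omega)]
  | succ k ih =>
      intro i j hk
      by_cases hji : j < i
      · rw [pal_lt s hji]
        unfold Tlt
        rw [Ico_empty_sum _ _ (by omega)]
      by_cases hij : i = j
      · subst hij
        rw [pal_self]
        unfold Tlt
        have h1 : Finset.Ico i (i+1) = {i} := by
          ext t; simp only [Finset.mem_Ico, Finset.mem_singleton]; omega
        simp [h1, palP]
      -- i < j
      have hlt : i < j := by omega
      have hj1 : j - 1 + 1 = j := by omega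
      have e1 : Tlt s i j = pal s i (j-1) := by
        rw [ih i (j-1) (by omega), hj1]
      have e2 : Tlt s (i+1) j = pal s (i+1) (j-1) := by
        rw [ih (i+1) (j-1) (by omega), hj1]
      have e3 : Tlt s (i+1) (j+1) = pal s (i+1) j := (ih (i+1) j (by omega)).symm
      have hsplit : ∑ x ∈ Finset.Ico i (j+1), palP s x j
          = palP s i j + ∑ x ∈ Finset.Ico (i+1) (j+1), palP s x j :=
        Ico_sum_bot i (j+1) (by omega) _
      have hcol := Tlt_col s i j
      have hcol' := Tlt_col s (i+1) j
      have hP : palP s i j = if s.getD i 0 = s.getD j 0 then pal s (i+1) (j-1) + 1 else 0 := by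
        unfold palP
        rw [if_neg (by omega), if_pos hlt]
      rw [pal_rec s hlt, hcol, hsplit, e1, hP]
      have hsub : ∑ x ∈ Finset.Ico (i+1) (j+1), palP s x j
          = Tlt s (i+1) (j+1) - Tlt s (i+1) j := by
        rw [hcol']; ring
      rw [hsub, e2, e3]
      split_ifs <;> ring

-- the weighted per-column sum B accumulates
def wcol (s : List Int) (n j : Nat) : Int :=
  ∑ x ∈ Finset.Ico 0 (j+1), ((x : Int) + 1) * ((n : Int) - (j : Int)) * palP s x j

lemma sum_range'_eq (f : Nat → Int) : ∀ c a,
    ((List.range' a c).map f).sum = ∑ j ∈ Finset.Ico a (a+c), f j := by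
  intro c
  induction c with
  | zero => intro a; simp
  | succ c ih =>
      intro a
      rw [List.range'_succ, List.map_cons, List.sum_cons, ih (a+1),
          Ico_sum_bot a (a+(c+1)) (by omega) f]
      have h : a + (c+1) = (a+1) + c := by omega
      rw [h]

-- grand = endpoint-pair counts weighted by the number of intervals containing them
lemma grand_eq_wsum (s : List Int) (n : Nat) :
    grand s n = ∑ j ∈ Finset.Ico 0 n, wcol s n j := by
  unfold grand
  rw [List.range_eq_range', sum_range'_eq (rowSum s n) n 0]
  calc ∑ i ∈ Finset.Ico 0 (0+n), rowSum s n i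
      = ∑ i ∈ Finset.Ico 0 n, ∑ j ∈ Finset.Ico i n, pal s i j := by
        apply Finset.sum_congr (by norm_num)
        intro i hi
        have hi' : i < n := by
          have := Finset.mem_Ico.mp hi; omega
        unfold rowSum
        rw [sum_range'_eq (pal s i) (n-i) i]
        have h : i + (n - i) = n := by omega
        rw [h]
    _ = ∑ i ∈ Finset.Ico 0 n, ∑ j ∈ Finset.Ico i n, ∑ y ∈ Finset.Ico i (j+1),
          ∑ x ∈ Finset.Ico i (y+1), palP s x y := by
        apply Finset.sum_congr rfl; intro i _
        apply Finset.sum_congr rfl; intro j _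
        rw [pal_eq_Tlt s (j+1-i) i j (le_refl _)]; rfl
    _ = ∑ i ∈ Finset.Ico 0 n, ∑ y ∈ Finset.Ico i n, ((n:Int) - (y:Int)) *
          ∑ x ∈ Finset.Ico i (y+1), palP s x y := by
        apply Finset.sum_congr rfl; intro i _
        rw [Finset.sum_comm' (t' := Finset.Ico i n) (s' := fun y => Finset.Ico y n)
          (by intro j y; simp only [Finset.mem_Ico]; omega)]
        apply Finset.sum_congr rfl; intro y hy
        have hy' : i ≤ y ∧ y < n := Finset.mem_Ico.mp hy
        rw [Finset.sum_const, Nat.card_Ico, nsmul_eq_mul]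
        congr 1
        push_cast [Nat.cast_sub (by omega : y ≤ n)]
        ring
    _ = ∑ y ∈ Finset.Ico 0 n, ∑ i ∈ Finset.Ico 0 (y+1), ((n:Int) - (y:Int)) *
          ∑ x ∈ Finset.Ico i (y+1), palP s x y := by
        rw [Finset.sum_comm' (t' := Finset.Ico 0 n) (s' := fun y => Finset.Ico 0 (y+1))
          (by intro i y; simp only [Finset.mem_Ico]; omega)]
    _ = ∑ j ∈ Finset.Ico 0 n, wcol s n j := by
        apply Finset.sum_congr rfl; intro y _
        unfold wcol
        rw [← Finset.mul_sum,
          Finset.sum_comm' (t' := Finset.Ico 0 (y+1)) (s' := fun x => Finset.Ico 0 (x+1))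
            (by intro i x; simp only [Finset.mem_Ico]; omega),
          Finset.mul_sum]
        apply Finset.sum_congr rfl; intro x _
        rw [Finset.sum_const, Nat.card_Ico, nsmul_eq_mul]
        push_cast
        ring

-- column suffix sums
def csum (s : List Int) (j i : Nat) : Int := ∑ x ∈ Finset.Ico i (j+1), palP s x j

-- named copies of B's loop bodies (definitionally equal to the lambdas in the port)
def Bcstep (s : List Int) (W : List Int) (j : Nat) (c : List Int) (a : Nat) : List Int :=
  if s.getD a 0 = s.getD j 0 then c.set a (W.getD (a+1) 0 + 1) else c

def Bcol (s : List Int) (W : List Int) (j : Nat) : List Int :=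
  (List.range j).foldl (Bcstep s W j) ((List.replicate (j+1) (0 : Int)).set j 1)

def Bdstep (n j : Nat) (col : List Int) (st2 : (List Int × Int) × Int) (a : Nat) :
    (List Int × Int) × Int :=
  let c := col.getD a 0
  let suf := st2.2 + c
  ((st2.1.1.set a (st2.1.1.getD a 0 + suf),
    st2.1.2 + ((a : Int) + 1) * ((n : Int) - (j : Int)) * c), suf)

def Bstep (s : List Int) (n : Nat) (st : List Int × Int) (j : Nat) : List Int × Int :=
  (((List.range (j+1)).reverse).foldl (Bdstep n j (Bcol s st.1 j)) ((st.1, st.2), 0)).1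

lemma alt_eq_fold (s : List Int) :
    count_subsymmetries_alt s
      = ((List.range s.length).foldl (Bstep s s.length) (List.replicate s.length 0, 0)).2 := rfl

-- characterization of B's col list
lemma B_col_aux (s : List Int) {n j : Nat} (W : List Int) (hj : j < n) : ∀ m, m ≤ j →
    ((List.range m).foldl (Bcstep s W j) ((List.replicate (j+1) (0 : Int)).set j 1)).length = j + 1 ∧
    ∀ a, a ≤ j →
      ((List.range m).foldl (Bcstep s W j) ((List.replicate (j+1) (0 : Int)).set j 1)).getD a 0
      = if a = j then 1
        else if a < m ∧ s.getD a 0 = s.getD j 0 then W.getD (a+1) 0 + 1 else 0 := by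
  intro m
  induction m with
  | zero =>
      intro _
      refine ⟨by simp, ?_⟩
      intro a ha
      simp only [List.range_zero, List.foldl_nil]
      rw [getD_set _ _ _ _ _ (by simp)]
      by_cases haj : a = j
      · rw [if_pos haj, if_pos haj]
      · rw [if_neg haj, if_neg haj, getD_replicate, if_pos (by omega),
          if_neg (fun hc => by omega)]
  | succ m ih =>
      intro hm
      obtain ⟨hlen, hget⟩ := ih (by omega)
      rw [List.range_succ, List.foldl_append, List.foldl_cons, List.foldl_nil]
      unfold Bcstep at hlen hget ⊢
      by_cases hs : s.getD m 0 = s.getD j 0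
      · rw [if_pos hs]
        refine ⟨by rw [List.length_set]; exact hlen, ?_⟩
        intro a ha
        rw [getD_set _ _ _ _ _ (by rw [hlen]; omega)]
        by_cases ham : a = m
        · subst ham
          rw [if_pos rfl, if_neg (by omega), if_pos ⟨by omega, hs⟩]
        · rw [if_neg ham, hget a ha]
          by_cases haj : a = j
          · rw [if_pos haj, if_pos haj]
          · rw [if_neg haj, if_neg haj]
            by_cases h1 : a < m ∧ s.getD a 0 = s.getD j 0
            · rw [if_pos h1, if_pos ⟨by omega, h1.2⟩]
            · rw [if_neg h1, if_neg (fun hc => h1 ⟨by omega, hc.2⟩)]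
      · rw [if_neg hs]
        refine ⟨hlen, ?_⟩
        intro a ha
        rw [hget a ha]
        by_cases haj : a = j
        · rw [if_pos haj, if_pos haj]
        · rw [if_neg haj, if_neg haj]
          by_cases h1 : a < m ∧ s.getD a 0 = s.getD j 0
          · rw [if_pos h1, if_pos ⟨by omega, h1.2⟩]
          · rw [if_neg h1, if_neg (by
              intro hc
              have ham : a ≠ m := by rintro rfl; exact hs hc.2
              exact h1 ⟨by omega, hc.2⟩)]

lemma B_col (s : List Int) {n j : Nat} (W : List Int) (hj : j < n)
    (hW : ∀ k, k < n → W.getD k 0 = Tlt s k j) :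
    ∀ a, a ≤ j → (Bcol s W j).getD a 0 = palP s a j := by
  intro a ha
  obtain ⟨-, hget⟩ := B_col_aux s W (n := n) hj j (le_refl j)
  unfold Bcol
  rw [hget a ha]
  by_cases haj : a = j
  · subst haj
    rw [if_pos rfl]
    simp [palP]
  · have haj' : a < j := by omega
    rw [if_neg haj]
    by_cases hs : s.getD a 0 = s.getD j 0
    · rw [if_pos ⟨haj', hs⟩, hW (a+1) (by omega)]
      have hj1 : j - 1 + 1 = j := by omega
      rw [show Tlt s (a+1) j = pal s (a+1) (j-1) by
        rw [pal_eq_Tlt s (j-1+1-(a+1)) (a+1) (j-1) (le_refl _), hj1]]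
      unfold palP
      rw [if_neg haj, if_pos haj', if_pos hs]
    · rw [if_neg (fun hc => hs hc.2)]
      unfold palP
      rw [if_neg haj, if_pos haj', if_neg hs]

-- the downward pass of B: suffix sums into W plus the weighted column total
lemma B_down (s : List Int) {n j : Nat} (col W0 : List Int) (t0 : Int)
    (hj : j < n) (hW0 : W0.length = n)
    (hcol : ∀ a, a ≤ j → col.getD a 0 = palP s a j) :
    ∀ c i0, i0 + c = j + 1 →
    (((List.range' i0 c).reverse).foldl (Bdstep n j col) ((W0, t0), 0)).1.1.length = n ∧
    (∀ k, k < n →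
      (((List.range' i0 c).reverse).foldl (Bdstep n j col) ((W0, t0), 0)).1.1.getD k 0
      = W0.getD k 0 + (if i0 ≤ k ∧ k ≤ j then csum s j k else 0)) ∧
    (((List.range' i0 c).reverse).foldl (Bdstep n j col) ((W0, t0), 0)).1.2
      = t0 + ∑ a ∈ Finset.Ico i0 (j+1), ((a : Int) + 1) * ((n : Int) - (j : Int)) * palP s a j ∧
    (((List.range' i0 c).reverse).foldl (Bdstep n j col) ((W0, t0), 0)).2 = csum s j i0 := by
  intro c
  induction c with
  | zero =>
      intro i0 hi0
      have hi0' : i0 = j + 1 := by omega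
      subst hi0'
      simp only [List.range'_zero, List.reverse_nil, List.foldl_nil]
      refine ⟨hW0, ?_, ?_, ?_⟩
      · intro k hk
        rw [if_neg (by omega)]
        ring
      · rw [Ico_empty_sum _ _ (le_refl _)]
        ring
      · unfold csum
        rw [Ico_empty_sum _ _ (le_refl _)]
  | succ c ih =>
      intro i0 hi0
      obtain ⟨ihlen, ihW, ihT, ihS⟩ := ih (i0+1) (by omega)
      rw [List.range'_succ, List.reverse_cons, List.foldl_append, List.foldl_cons, List.foldl_nil]
      unfold Bdstep at ihlen ihW ihT ihS ⊢
      simp only []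
      have hi0j : i0 ≤ j := by omega
      have hci0 : col.getD i0 0 = palP s i0 j := hcol i0 hi0j
      have hsuf : csum s j (i0+1) + col.getD i0 0 = csum s j i0 := by
        rw [hci0]
        unfold csum
        rw [Ico_sum_bot i0 (j+1) (by omega) (fun x => palP s x j)]
        ring
      refine ⟨by rw [List.length_set]; exact ihlen, ?_, ?_, ?_⟩
      · intro k hk
        rw [getD_set _ _ _ _ _ (by rw [ihlen]; omega), ihS]
        by_cases hki : k = i0
        · subst hki
          rw [if_pos rfl, ihW k hk, if_neg (by omega), if_pos ⟨le_refl _, hi0j⟩, hsuf]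
          ring
        · rw [if_neg hki, ihW k hk]
          by_cases h1 : i0 + 1 ≤ k ∧ k ≤ j
          · rw [if_pos h1, if_pos ⟨by omega, h1.2⟩]
          · rw [if_neg h1, if_neg (fun hc => h1 ⟨by omega, hc.2⟩)]
      · rw [ihT, hci0, Ico_sum_bot i0 (j+1) (by omega)
          (fun a => ((a : Int) + 1) * ((n : Int) - (j : Int)) * palP s a j)]
        ring
      · rw [ihS, hsuf]

-- one full column step of B's outer fold
lemma B_step (s : List Int) {n j : Nat} (st : List Int × Int)
    (hj : j < n) (hW : st.1.length = n) (hWv : ∀ k, k < n → st.1.getD k 0 = Tlt s k j) :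
    (Bstep s n st j).1.length = n ∧
    (∀ k, k < n → (Bstep s n st j).1.getD k 0 = Tlt s k (j+1)) ∧
    (Bstep s n st j).2 = st.2 + wcol s n j := by
  have hcol := B_col s st.1 hj hWv
  obtain ⟨hlen, hWk, hT, -⟩ := B_down s (Bcol s st.1 j) st.1 st.2 hj hW hcol (j+1) 0 (by omega)
  have h2 : Bstep s n st j
      = (((List.range (j+1)).reverse).foldl (Bdstep n j (Bcol s st.1 j)) ((st.1, st.2), 0)).1 :=
    rfl
  rw [h2, List.range_eq_range']
  refine ⟨hlen, ?_, ?_⟩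
  · intro k hk
    rw [hWk k hk, hWv k hk]
    by_cases hkj : k ≤ j
    · rw [if_pos ⟨by omega, hkj⟩, Tlt_col s k j]
      rfl
    · rw [if_neg (by omega), Tlt_col s k j, Ico_empty_sum _ _ (by omega)]
  · rw [hT]
    rfl

-- B's outer fold invariant
lemma B_outer (s : List Int) {n : Nat} : ∀ m, m ≤ n →
    ((List.range m).foldl (Bstep s n) (List.replicate n 0, 0)).1.length = n ∧
    (∀ k, k < n →
      ((List.range m).foldl (Bstep s n) (List.replicate n 0, 0)).1.getD k 0 = Tlt s k m) ∧
    ((List.range m).foldl (Bstep s n) (List.replicate n 0, 0)).2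
      = ∑ j ∈ Finset.Ico 0 m, wcol s n j := by
  intro m
  induction m with
  | zero =>
      intro _
      refine ⟨by simp, ?_, by simp⟩
      intro k hk
      simp only [List.range_zero, List.foldl_nil]
      rw [getD_replicate, if_pos hk]
      unfold Tlt
      rw [Ico_empty_sum _ _ (by omega)]
  | succ m ih =>
      intro hm
      obtain ⟨ihlen, ihW, ihT⟩ := ih (by omega)
      rw [List.range_succ, List.foldl_append, List.foldl_cons, List.foldl_nil]
      have hstep := B_step s (j := m)
        ((List.range m).foldl (Bstep s n) (List.replicate n 0, 0))
        (by omega) ihlen ihW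
      obtain ⟨hlen', hW', hT'⟩ := hstep
      refine ⟨hlen', hW', ?_⟩
      rw [hT', ihT, Finset.sum_Ico_succ_top (by omega) (wcol s n)]

lemma B_eq_grand (s : List Int) : count_subsymmetries_alt s = grand s s.length := by
  rw [alt_eq_fold]
  obtain ⟨-, -, hT⟩ := B_outer s s.length (le_refl _)
  rw [hT, grand_eq_wsum]

-- ===== VERDICT (by name: the statement is the Claim_ definition above) =====
theorem count_subsymmetries_spec : Claim_equal_count_subsymmetries := by
  intro s _
  unfold Spec_count_subsymmetries
  rw [A_eq_grand, B_eq_grand]
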